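-- pv_equiv track=rewrite | github.com/Jb-Za/QuantumTeleportationProtocol | QuantumTeleportation.py | string_to_binary
-- ===== SOURCE A (Python) =====
-- def string_to_binary(message):
--     l = []
--     m = []
--     for i in message:
--         l.append(ord(i)) # convert each letter to unicode
--     for i in l:
--         m.append(int(bin(i)[2:])) # return the binary representation of the unicode input
--     return m
-- ===== SOURCE B (Python) =====
-- def string_to_binary(message):
--     out = []
--     for ch in message:
--         n = ord(ch)
--         result = 0
--         mult = 1
--         while n > 0:
--             result += (n % 2) * mult
--             mult *= 10
--             n //= 2
--         out.append(result)
--     return out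
-- ===== Notes on version B (the rewrite author's own statement) =====
-- stated objective: alternative
-- what changed: Replaces the two-pass bin()-string-slice-then-int(...) pipeline with a single pass that converts each code point by repeated division into its binary-digits-as-decimal integer, with no string formatting or parsing.
import Mathlib
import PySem

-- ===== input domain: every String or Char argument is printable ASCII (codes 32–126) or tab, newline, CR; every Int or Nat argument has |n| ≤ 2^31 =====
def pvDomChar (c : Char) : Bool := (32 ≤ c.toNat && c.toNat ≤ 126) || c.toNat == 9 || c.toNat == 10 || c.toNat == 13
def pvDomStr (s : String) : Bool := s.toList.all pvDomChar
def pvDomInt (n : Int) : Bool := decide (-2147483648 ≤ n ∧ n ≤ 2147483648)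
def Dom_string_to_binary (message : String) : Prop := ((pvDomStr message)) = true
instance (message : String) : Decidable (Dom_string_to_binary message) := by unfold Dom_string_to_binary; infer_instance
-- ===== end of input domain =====

-- B replaces A's bin()-string-slice-then-int parsing with pure per-character arithmetic; alternative decomposition, no speed claim.

-- ===== PORT A =====
-- digits of bin(n) after the "0b" prefix (Python's bin builds them by halving);
-- fuel is a totality device only: fuel = n always suffices since n halves to 0 within n steps
def pvBinDigits (fuel n : Nat) : List Char :=
  match fuel with
  | 0 => []
  | fuel + 1 =>
    if n = 0 then []
    else pvBinDigits fuel (n / 2) ++ [if n % 2 = 1 then '1' else '0']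

-- bin(i) for i ≥ 0 (ord is always nonnegative, so Python's negative-case "-0b…" is unreachable here)
def pvBin (i : Int) : String :=
  String.ofList ('0' :: 'b' :: (if i.toNat = 0 then ['0'] else pvBinDigits i.toNat i.toNat))

def string_to_binary (message : String) : List Int :=
  let l := message.toList.foldl (fun l c => l ++ [(c.toNat : Int)]) []
  let m := l.foldl (fun m i =>
    -- int(bin(i)[2:]); ofStr? is always `some` here (the slice is a nonempty digit string), getD 0 never fires
    m ++ [(PySem.Int.ofStr? (PySem.Str.slice (pvBin i) (some 2) none)).getD 0]) []
  m

-- ===== PORT B =====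
-- the while loop: while n > 0: result += (n%2)*mult; mult *= 10; n //= 2  (n = ord ≥ 0, so Nat division = Python //)
-- fuel is a totality device only: the initial fuel = n always suffices since n halves to 0 within n steps
def pvBinDecLoop (fuel n : Nat) (result mult : Int) : Int :=
  match fuel with
  | 0 => result
  | fuel + 1 =>
    if n > 0 then pvBinDecLoop fuel (n / 2) (result + (n % 2 : Nat) * mult) (mult * 10)
    else result

def string_to_binary_alt (message : String) : List Int :=
  message.toList.foldl (fun out c => out ++ [pvBinDecLoop c.toNat c.toNat 0 1]) []

-- ===== PRECONDITION & SPEC =====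
def Spec_string_to_binary (message : String) (out : List Int) : Prop := out = string_to_binary_alt message
instance (message : String) (out : List Int) : Decidable (Spec_string_to_binary message out) := by unfold Spec_string_to_binary; infer_instance

-- ===== CLAIM (what is proved, stated in full; the proofs are below) =====
def Claim_equal_string_to_binary : Prop := ∀ (message : String), Dom_string_to_binary message → Spec_string_to_binary message (string_to_binary message)

-- ===== LEMMAS AND PROOFS =====

theorem foldl_app_map {α β : Type} (f : α → β) (xs : List α) (acc : List β) :
    xs.foldl (fun a x => a ++ [f x]) acc = acc ++ xs.map f := by
  induction xs generalizing acc with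
  | nil => simp
  | cons x xs ih => simp [List.foldl, ih]

set_option maxRecDepth 4000 in
theorem perChar_eq : ∀ n : Nat, n < 127 →
    (PySem.Int.ofStr? (PySem.Str.slice (pvBin (n : Int)) (some 2) none)).getD 0
      = pvBinDecLoop n n 0 1 := by decide

theorem domChar_lt (c : Char) (h : pvDomChar c = true) : c.toNat < 127 := by
  simp [pvDomChar] at h; omega

theorem string_to_binary_spec : Claim_equal_string_to_binary := by
  intro message hdom
  show string_to_binary message = string_to_binary_alt message
  rw [string_to_binary, string_to_binary_alt]
  rw [foldl_app_map, foldl_app_map, foldl_app_map]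
  simp only [List.nil_append, List.map_map, Function.comp_def]
  apply List.map_congr_left
  intro c hc
  have hd : pvDomChar c = true := by
    have := hdom; unfold Dom_string_to_binary pvDomStr at this
    exact List.all_eq_true.mp this c hc
  exact perChar_eq c.toNat (domChar_lt c hd)

-- ===== VERDICT (by name: the statement is the Claim_ definition above) =====
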